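-- pv_equiv track=rewrite | github.com/latiscool/Consolidacion_M3_LTG | ConsolidacionLuisTorresGomez.py | nombresPorGrupo
-- ===== SOURCE A (Python) =====
-- def nombresPorGrupo(nombres):
--     grupoMago = []
--     grupoCientifico = []
--     Otros = []
--     for m in nombres:
--         if m == "Harry Houdini" or m == "David Blaine" or m == "Teller":
--             grupoMago.append(m)
--         elif m == "Newton" or m == "Hawking" or m == "Einstein":
--             grupoCientifico.append(m)
--         else:
--             Otros.append(m)
--     return grupoMago, grupoCientifico, Otros
-- ===== SOURCE B (Python) =====
-- MAGOS = {"Harry Houdini", "David Blaine", "Teller"}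
-- CIENTIFICOS = {"Newton", "Hawking", "Einstein"}
--
-- def nombresPorGrupo(nombres):
--     nombres = list(nombres)
--     magos = [m for m in nombres if m in MAGOS]
--     cientificos = [m for m in nombres if m in CIENTIFICOS]
--     otros = [m for m in nombres if m not in MAGOS and m not in CIENTIFICOS]
--     return magos, cientificos, otros
-- ===== Notes on version B (the rewrite author's own statement) =====
-- stated objective: idiomatic
-- what changed: Replaces A's single branching loop over three mutable accumulators with three independent filtering comprehensions over set membership.
import Mathlib
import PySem

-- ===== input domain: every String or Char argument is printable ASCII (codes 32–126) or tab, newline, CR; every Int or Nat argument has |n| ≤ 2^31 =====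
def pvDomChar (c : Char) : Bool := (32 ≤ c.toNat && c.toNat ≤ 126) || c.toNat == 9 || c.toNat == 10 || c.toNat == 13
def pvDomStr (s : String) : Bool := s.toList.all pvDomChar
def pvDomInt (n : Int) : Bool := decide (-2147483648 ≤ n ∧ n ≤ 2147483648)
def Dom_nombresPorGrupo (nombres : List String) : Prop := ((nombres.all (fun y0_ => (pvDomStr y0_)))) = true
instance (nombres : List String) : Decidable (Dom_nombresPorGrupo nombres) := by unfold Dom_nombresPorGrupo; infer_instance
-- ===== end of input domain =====

-- B is an idiomatic three-comprehension re-decomposition of A's single branching loop; same O(n) cost.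

-- ===== PORT A =====
-- A: one pass, three mutable accumulators, branch per element.
def nombresPorGrupoStep (st : List String × List String × List String) (m : String) :
    List String × List String × List String :=
  if m = "Harry Houdini" ∨ m = "David Blaine" ∨ m = "Teller" then
    (st.1 ++ [m], st.2.1, st.2.2)
  else if m = "Newton" ∨ m = "Hawking" ∨ m = "Einstein" then
    (st.1, st.2.1 ++ [m], st.2.2)
  else
    (st.1, st.2.1, st.2.2 ++ [m])

def nombresPorGrupo (nombres : List String) : List String × List String × List String :=
  nombres.foldl nombresPorGrupoStep ([], [], [])

-- ===== PORT B =====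
-- B: three independent filters over membership in the two name sets.
def pvMagos : List String := ["Harry Houdini", "David Blaine", "Teller"]
def pvCientificos : List String := ["Newton", "Hawking", "Einstein"]

def nombresPorGrupo_alt (nombres : List String) : List String × List String × List String :=
  (nombres.filter (fun m => m ∈ pvMagos),
   nombres.filter (fun m => m ∈ pvCientificos),
   nombres.filter (fun m => m ∉ pvMagos && m ∉ pvCientificos))

-- ===== PRECONDITION & SPEC =====
def Spec_nombresPorGrupo (nombres : List String) (out : List String × List String × List String) : Prop := out = nombresPorGrupo_alt nombres
instance (nombres : List String) (out : List String × List String × List String) : Decidable (Spec_nombresPorGrupo nombres out) := by unfold Spec_nombresPorGrupo; infer_instance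

-- ===== CLAIM (what is proved, stated in full; the proofs are below) =====
def Claim_equal_nombresPorGrupo : Prop := ∀ (nombres : List String), Dom_nombresPorGrupo nombres → Spec_nombresPorGrupo nombres (nombresPorGrupo nombres)

-- ===== LEMMAS AND PROOFS =====
theorem nombresPorGrupo_foldl (nombres a b c : List String) :
    nombres.foldl nombresPorGrupoStep (a, b, c) =
      (a ++ nombres.filter (fun m => m ∈ pvMagos),
       b ++ nombres.filter (fun m => m ∈ pvCientificos),
       c ++ nombres.filter (fun m => m ∉ pvMagos && m ∉ pvCientificos)) := by
  induction nombres generalizing a b c with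
  | nil => simp
  | cons x xs ih =>
    simp only [List.foldl_cons, nombresPorGrupoStep, List.filter_cons]
    by_cases h1 : x = "Harry Houdini" ∨ x = "David Blaine" ∨ x = "Teller"
    · have hm : x ∈ pvMagos := by rcases h1 with h | h | h <;> simp [pvMagos, h]
      have hc : x ∉ pvCientificos := by
        rcases h1 with h | h | h <;> simp [pvCientificos, h]
      simp [h1, ih, hm, hc]
    · have hm : x ∉ pvMagos := by simp [pvMagos]; tauto
      by_cases h2 : x = "Newton" ∨ x = "Hawking" ∨ x = "Einstein"
      · have hc : x ∈ pvCientificos := by rcases h2 with h | h | h <;> simp [pvCientificos, h]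
        simp [h1, h2, ih, hm, hc]
      · have hc : x ∉ pvCientificos := by simp [pvCientificos]; tauto
        simp [h1, h2, ih, hm, hc]

-- ===== VERDICT (by name: the statement is the Claim_ definition above) =====
theorem nombresPorGrupo_spec : Claim_equal_nombresPorGrupo := by
  intro nombres _
  unfold Spec_nombresPorGrupo nombresPorGrupo nombresPorGrupo_alt
  simp [nombresPorGrupo_foldl]
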